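-- pv_equiv track=rewrite | github.com/brianzliu/dsc40b-hw9 | min_ell_theta.py | minimize_ell
-- ===== SOURCE A (Python) =====
-- def compute_ell(data, colors, theta):
--     loss = 0
--     for i in range(len(data)):
--         val = data[i]
--         col = colors[i]
--
--         if col == 'red' and val <= theta:
--             loss += 1
--         elif col == 'blue' and val > theta:
--             loss += 1
--
--     return float(loss)
--
-- def minimize_ell(data, colors):
--     best_theta = 0.0
--     min_loss = float('inf')
--
--     for x in data:
--         current_loss = compute_ell(data, colors, x)
--
--         if current_loss < min_loss:
--             min_loss = current_loss
--             best_theta = x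
--
--     return best_theta
-- ===== SOURCE B (Python) =====
-- def minimize_ell(data, colors):
--     # Count red/blue occurrences per value over the paired portion.
--     red = {}
--     blue = {}
--     for v, c in zip(data, colors):
--         if c == 'red':
--             red[v] = red.get(v, 0) + 1
--         elif c == 'blue':
--             blue[v] = blue.get(v, 0) + 1
--     blue_total = sum(1 for v, c in zip(data, colors) if c == 'blue')
--     # One sweep over the sorted distinct values: loss(v) = reds <= v  +  blues > v.
--     loss_at = {}
--     r = 0
--     b = 0
--     for v in sorted(set(data)):
--         r += red.get(v, 0)
--         b += blue.get(v, 0)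
--         loss_at[v] = r + (blue_total - b)
--     # First strict minimum in original data order, as A does.
--     best_theta = 0
--     min_loss = None
--     for x in data:
--         l = loss_at[x]
--         if min_loss is None or l < min_loss:
--             min_loss = l
--             best_theta = x
--     return best_theta
-- ===== Notes on version B (the rewrite author's own statement) =====
-- stated objective: faster
-- what changed: Instead of recomputing the full loss for every candidate theta (a scan per element), B counts red/blue occurrences per value in one pass, computes each distinct value's loss by a single prefix-sum sweep over the sorted distinct values, and then picks the first strict minimum in data order via O(1) dict lookups.
-- outside the precondition, e.g. on minimize_ell([], []): A returns 0.0, B returns 0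
import Mathlib
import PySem

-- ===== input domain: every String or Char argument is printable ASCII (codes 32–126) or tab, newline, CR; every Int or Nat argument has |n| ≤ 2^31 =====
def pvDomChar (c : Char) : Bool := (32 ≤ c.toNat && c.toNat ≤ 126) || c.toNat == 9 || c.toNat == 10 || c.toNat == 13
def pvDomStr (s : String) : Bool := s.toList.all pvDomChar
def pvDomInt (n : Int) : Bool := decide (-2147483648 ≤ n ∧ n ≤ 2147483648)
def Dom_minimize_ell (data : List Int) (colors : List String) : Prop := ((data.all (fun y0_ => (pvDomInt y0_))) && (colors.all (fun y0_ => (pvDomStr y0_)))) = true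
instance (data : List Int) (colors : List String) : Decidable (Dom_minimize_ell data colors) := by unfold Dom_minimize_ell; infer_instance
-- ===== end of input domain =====

-- B replaces A's per-candidate rescan of all data by one prefix-count sweep over the sorted
-- distinct values, then picks the first strict minimum in data order by dict lookup (faster).

-- ===== PORT A =====
def compute_ell (data : List Int) (colors : List String) (theta : Int) : Int :=
  (PySem.List.pyRange 0 (PySem.List.len data) 1).foldl (fun loss i =>
    let val := PySem.List.pyGetD data i 0
    let col := PySem.List.pyGetD colors i ""
    if col = "red" ∧ val ≤ theta then loss + 1
    else if col = "blue" ∧ theta < val then loss + 1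
    else loss) 0

def minimize_ell (data : List Int) (colors : List String) : Int :=
  -- best_theta = 0.0; min_loss = float('inf'): none plays inf; Pre_ keeps the float 0.0 unreturned
  (data.foldl (fun (s : Int × Option Int) x =>
    let current_loss := compute_ell data colors x
    match s.2 with
    | none => (x, some current_loss)
    | some m => if current_loss < m then (x, some current_loss) else s) (0, none)).1

-- ===== PORT B =====
def minimize_ell_alt (data : List Int) (colors : List String) : Int :=
  let zs := data.zip colors
  -- per-value red/blue counters
  let cnts := zs.foldl (fun (s : PySem.Dict Int Int × PySem.Dict Int Int) p =>
      if p.2 = "red" then (s.1.modify p.1 0 (· + 1), s.2)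
      else if p.2 = "blue" then (s.1, s.2.modify p.1 0 (· + 1))
      else s) (PySem.Dict.empty, PySem.Dict.empty)
  let blue_total : Int := zs.foldl (fun acc p => if p.2 = "blue" then acc + 1 else acc) 0
  -- prefix-sum sweep over the sorted distinct values: loss(v) = reds ≤ v + blues > v
  let st := (PySem.List.sorted (PySem.Set.ofList data) (fun v => v) false).foldl
      (fun (s : PySem.Dict Int Int × Int × Int) v =>
        let r := s.2.1 + cnts.1.getD v 0
        let b := s.2.2 + cnts.2.getD v 0
        (s.1.insert v (r + (blue_total - b)), r, b)) (PySem.Dict.empty, 0, 0)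
  -- first strict minimum in data order
  (data.foldl (fun (s : Int × Option Int) x =>
      let l := st.1.getD x 0
      match s.2 with
      | none => (x, some l)
      | some m => if l < m then (x, some l) else s) (0, none)).1

-- ===== PRECONDITION & SPEC =====
-- Pre_ excludes (a) colors shorter than data, where A raises IndexError, and (b) empty data,
-- where A returns the float 0.0, which is not a value of the declared int return type.
def Pre_minimize_ell (data : List Int) (colors : List String) : Prop :=
  data ≠ [] ∧ data.length ≤ colors.length
instance (data : List Int) (colors : List String) : Decidable (Pre_minimize_ell data colors) := by
  unfold Pre_minimize_ell; infer_instance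

def pvWitness_minimize_ell : List Int × List String := ([1, 2, 3], ["red", "blue", "red"])

def Spec_minimize_ell (data : List Int) (colors : List String) (out : Int) : Prop := out = minimize_ell_alt data colors
instance (data : List Int) (colors : List String) (out : Int) : Decidable (Spec_minimize_ell data colors out) := by unfold Spec_minimize_ell; infer_instance

-- ===== CLAIM (what is proved, stated in full; the proofs are below) =====
def Claim_equal_minimize_ell : Prop := ∀ (data : List Int) (colors : List String), Dom_minimize_ell data colors → Pre_minimize_ell data colors → Spec_minimize_ell data colors (minimize_ell data colors)

-- ===== LEMMAS AND PROOFS =====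

-- A's per-element test (red and ≤ θ, or blue and > θ) on a zipped pair.
def pvLossP (theta : Int) (p : Int × String) : Bool :=
  (p.2 == "red" && decide (p.1 ≤ theta)) || (p.2 == "blue" && decide (theta < p.1))

-- compute_ell counts pvLossP over the zipped lists.
lemma compute_ell_eq_countP (data : List Int) (colors : List String)
    (h : data.length ≤ colors.length) (theta : Int) :
    compute_ell data colors theta = ((data.zip colors).countP (pvLossP theta) : Int) := by
  unfold compute_ell pvLossP
  have hz : (data.zip colors).length = data.length := by
    simp [List.length_zip]; omega
  have hlen : PySem.List.len data = PySem.List.len (data.zip colors) := by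
    simp [PySem.List.len_eq, hz]
  rw [hlen]
  have hfold := PySem.List.foldl_pyRange_pyGetD (data.zip colors) (0, "")
    (fun (acc : Int) (p : Int × String) =>
      if (p.2 == "red" && decide (p.1 ≤ theta)) || (p.2 == "blue" && decide (theta < p.1))
      then acc + 1 else acc) 0 (le_refl (0:Int))
  simp only [Int.toNat_zero, List.drop_zero] at hfold
  have hcong : ∀ (acc : Int) (i : Int), i ∈ PySem.List.pyRange 0 (PySem.List.len (data.zip colors)) 1 →
      (fun loss i =>
      let val := PySem.List.pyGetD data i 0
      let col := PySem.List.pyGetD colors i ""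
      if col = "red" ∧ val ≤ theta then loss + 1
      else if col = "blue" ∧ theta < val then loss + 1
      else loss) acc i
    = (fun acc j =>
        (fun (acc : Int) (p : Int × String) =>
          if (p.2 == "red" && decide (p.1 ≤ theta)) || (p.2 == "blue" && decide (theta < p.1))
          then acc + 1 else acc) acc (PySem.List.pyGetD (data.zip colors) j (0, ""))) acc i := by
    intro acc i hi
    rw [PySem.List.mem_pyRange_one] at hi
    have h0 : (0:Int) ≤ i := hi.1
    have h1 : i < ((data.zip colors).length : Int) := by
      have := hi.2; simpa [PySem.List.len_eq] using this
    have h1d : i < (data.length : Int) := by omega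
    have h1c : i < (colors.length : Int) := by omega
    simp only []
    rw [PySem.List.pyGetD_eq_getElem data 0 h0 (by simpa [PySem.List.len_eq] using h1d),
        PySem.List.pyGetD_eq_getElem colors "" h0 (by simpa [PySem.List.len_eq] using h1c),
        PySem.List.pyGetD_eq_getElem (data.zip colors) (0,"") h0 (by simpa [PySem.List.len_eq] using h1)]
    simp only [List.getElem_zip]
    by_cases hr : colors[i.toNat] = "red" ∧ data[i.toNat] ≤ theta
    · simp [hr]
    · by_cases hb : colors[i.toNat] = "blue" ∧ theta < data[i.toNat]
      · simp only [if_neg hr, if_pos hb]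
        rw [if_pos]
        simp only [Bool.or_eq_true, Bool.and_eq_true, beq_iff_eq, decide_eq_true_eq]
        exact Or.inr hb
      · simp only [if_neg hr, if_neg hb]
        rw [if_neg]
        simp only [Bool.or_eq_true, Bool.and_eq_true, beq_iff_eq, decide_eq_true_eq]
        tauto
  calc (PySem.List.pyRange 0 (PySem.List.len (data.zip colors)) 1).foldl (fun loss i =>
      let val := PySem.List.pyGetD data i 0
      let col := PySem.List.pyGetD colors i ""
      if col = "red" ∧ val ≤ theta then loss + 1
      else if col = "blue" ∧ theta < val then loss + 1
      else loss) (0:Int)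
      = (PySem.List.pyRange 0 (PySem.List.len (data.zip colors)) 1).foldl (fun acc j =>
        (fun (acc : Int) (p : Int × String) =>
          if (p.2 == "red" && decide (p.1 ≤ theta)) || (p.2 == "blue" && decide (theta < p.1))
          then acc + 1 else acc) acc (PySem.List.pyGetD (data.zip colors) j (0, ""))) 0 :=
        PySem.List.foldl_congr_mem _ _ _ _ hcong
    _ = (data.zip colors).foldl (fun (acc : Int) (p : Int × String) =>
          if (p.2 == "red" && decide (p.1 ≤ theta)) || (p.2 == "blue" && decide (theta < p.1))
          then acc + 1 else acc) 0 := hfold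
    _ = ((data.zip colors).countP (fun p =>
        (p.2 == "red" && decide (p.1 ≤ theta)) || (p.2 == "blue" && decide (theta < p.1))) : Int) := by
        rw [PySem.List.foldl_if_add_one]; ring

-- the two counter dicts record, per value, how many red / blue pairs carry it
lemma counters_getD (zs : List (Int × String)) (d1 d2 : PySem.Dict Int Int) (v : Int) :
    ((zs.foldl (fun (s : PySem.Dict Int Int × PySem.Dict Int Int) p =>
      if p.2 = "red" then (s.1.modify p.1 0 (· + 1), s.2)
      else if p.2 = "blue" then (s.1, s.2.modify p.1 0 (· + 1))
      else s) (d1, d2)).1.getD v 0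
      = d1.getD v 0 + (zs.countP (fun p => p.1 == v && p.2 == "red") : Int))
    ∧ ((zs.foldl (fun (s : PySem.Dict Int Int × PySem.Dict Int Int) p =>
      if p.2 = "red" then (s.1.modify p.1 0 (· + 1), s.2)
      else if p.2 = "blue" then (s.1, s.2.modify p.1 0 (· + 1))
      else s) (d1, d2)).2.getD v 0
      = d2.getD v 0 + (zs.countP (fun p => p.1 == v && p.2 == "blue") : Int)) := by
  induction zs generalizing d1 d2 with
  | nil => simp
  | cons p t ih =>
    by_cases hr : p.2 = "red"
    · by_cases hv : p.1 = v
      · simp only [List.foldl_cons, if_pos hr, List.countP_cons]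
        have := ih (d1.modify p.1 0 (· + 1)) d2
        rw [this.1, this.2, hv, PySem.Dict.getD_modify_self]
        constructor <;> simp [hr] <;> push_cast <;> ring
      · simp only [List.foldl_cons, if_pos hr, List.countP_cons]
        have := ih (d1.modify p.1 0 (· + 1)) d2
        rw [this.1, this.2, PySem.Dict.getD_modify_of_ne _ _ _ (fun hc : v = p.1 => hv hc.symm)]
        constructor <;> simp [hv, hr]
    · by_cases hb : p.2 = "blue"
      · by_cases hv : p.1 = v
        · simp only [List.foldl_cons, if_neg hr, if_pos hb, List.countP_cons]
          have := ih d1 (d2.modify p.1 0 (· + 1))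
          rw [this.1, this.2, hv, PySem.Dict.getD_modify_self]
          constructor <;> simp [hr, hb] <;> push_cast <;> ring
        · simp only [List.foldl_cons, if_neg hr, if_pos hb, List.countP_cons]
          have := ih d1 (d2.modify p.1 0 (· + 1))
          rw [this.1, this.2, PySem.Dict.getD_modify_of_ne _ _ _ (fun hc : v = p.1 => hv hc.symm)]
          constructor <;> simp [hv, hb]
      · simp only [List.foldl_cons, if_neg hr, if_neg hb, List.countP_cons]
        have := ih d1 d2
        rw [this.1, this.2]
        constructor <;> simp [hr, hb]

-- the sweep never touches keys it does not visit
lemma sweep_not_mem (bt : Int) (R B : Int → Int) (vs : List Int) (D : PySem.Dict Int Int)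
    (r b x : Int) (hx : x ∉ vs) :
    ((vs.foldl (fun (s : PySem.Dict Int Int × Int × Int) v =>
      let r := s.2.1 + R v
      let b := s.2.2 + B v
      (s.1.insert v (r + (bt - b)), r, b)) (D, r, b)).1.getD x 0) = D.getD x 0 := by
  induction vs generalizing D r b with
  | nil => rfl
  | cons v t ih =>
    simp only [List.foldl_cons]
    rw [ih _ _ _ (fun h => hx (List.mem_cons_of_mem _ h)),
        PySem.Dict.getD_insert_of_ne _ _ _ (fun h : x = v => hx (h ▸ List.mem_cons_self))]

-- after the sweep, each visited key holds its prefix sums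
lemma sweep_getD (bt : Int) (R B : Int → Int) (vs : List Int)
    (hp : vs.Pairwise (· < ·)) (D : PySem.Dict Int Int) (r b x : Int) (hx : x ∈ vs) :
    ((vs.foldl (fun (s : PySem.Dict Int Int × Int × Int) v =>
      let r := s.2.1 + R v
      let b := s.2.2 + B v
      (s.1.insert v (r + (bt - b)), r, b)) (D, r, b)).1.getD x 0)
    = (r + ((vs.filter (fun v => decide (v ≤ x))).map R).sum)
      + (bt - (b + ((vs.filter (fun v => decide (v ≤ x))).map B).sum)) := by
  induction vs generalizing D r b with
  | nil => cases hx
  | cons v t ih =>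
    have hpt := (List.pairwise_cons.mp hp).2
    have hlt := (List.pairwise_cons.mp hp).1
    simp only [List.foldl_cons]
    rcases List.mem_cons.mp hx with rfl | hxt
    · have hnx : x ∉ t := fun h => lt_irrefl x (hlt x h)
      rw [sweep_not_mem bt R B t _ _ _ _ hnx, PySem.Dict.getD_insert_self]
      have hf : t.filter (fun v => decide (v ≤ x)) = [] := by
        rw [List.filter_eq_nil_iff]
        intro w hw
        simpa using not_le.mpr (hlt w hw)
      simp [hf]
    · have hvx : v ≤ x := le_of_lt (hlt x hxt)
      rw [ih hpt _ _ _ hxt]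
      simp only [List.filter_cons, decide_eq_true_eq, if_pos hvx, List.map_cons, List.sum_cons]
      ring

-- summing per-value counts over distinct values is one filtered count
lemma sum_countP_partition (zs : List (Int × String)) (q : Int × String → Bool)
    (S : List Int) (hnd : S.Nodup) :
    (S.map (fun v => ((zs.countP (fun p => p.1 == v && q p)) : Int))).sum
    = ((zs.countP (fun p => decide (p.1 ∈ S) && q p)) : Int) := by
  induction zs with
  | nil => simp
  | cons p t ih =>
    simp only [List.countP_cons]
    push_cast
    rw [← ih]
    have h2 : (S.map (fun v => if (p.1 == v && q p) then (1:Int) else 0)).sum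
        = (S.countP (fun v => p.1 == v && q p) : Int) :=
      PySem.List.sum_map_ite_one_zero _ S
    have h3 : (S.countP (fun v => p.1 == v && q p) : Int)
        = if decide (p.1 ∈ S) && q p then 1 else 0 := by
      by_cases hq : q p
      · simp only [hq, Bool.and_true]
        by_cases hm : p.1 ∈ S
        · have : S.countP (fun v => p.1 == v) = S.count p.1 := by
            apply List.countP_congr
            intro a _
            simp [BEq.comm]
          rw [this, List.count_eq_one_of_mem hnd hm]
          simp [hm]
        · have : S.countP (fun v => p.1 == v) = 0 := by
            rw [List.countP_eq_zero]
            intro a ha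
            simp only [beq_iff_eq]
            intro hc
            exact hm (hc ▸ ha)
          rw [this]
          simp [hm]
      · simp [hq]
    calc (S.map (fun v => ((t.countP (fun p => p.1 == v && q p) : Int)
          + if (p.1 == v && q p) then 1 else 0))).sum
        = (S.map (fun v => (t.countP (fun p => p.1 == v && q p) : Int))).sum
          + (S.map (fun v => if (p.1 == v && q p) then (1:Int) else 0)).sum :=
      PySem.List.sum_map_add_int S _ _
      _ = _ := by rw [h2, h3]

-- per-pair case split: [red ∧ ≤θ] + [blue ∧ >θ] = [red ∧ ≤θ] + [blue] − [blue ∧ ≤θ]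
lemma count_arith (zs : List (Int × String)) (theta : Int) :
    ((zs.countP (pvLossP theta)) : Int)
    = (zs.countP (fun p => p.2 == "red" && decide (p.1 ≤ theta)) : Int)
      + ((zs.countP (fun p => p.2 == "blue") : Int)
         - (zs.countP (fun p => p.2 == "blue" && decide (p.1 ≤ theta)) : Int)) := by
  induction zs with
  | nil => simp
  | cons p t ih =>
    simp only [List.countP_cons]
    push_cast
    by_cases h1 : p.2 = "red"
    · have h2 : ¬ p.2 = "blue" := by rw [h1]; decide
      by_cases h3 : p.1 ≤ theta <;> simp [pvLossP, h1, h2, h3] <;> omega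
    · by_cases h2 : p.2 = "blue"
      · by_cases h3 : p.1 ≤ theta <;> simp [pvLossP, h1, h2, h3, not_le.mp] <;> omega
      · simp [pvLossP, h1, h2] <;> omega

theorem minimize_ell_spec : Claim_equal_minimize_ell := by
  intro data colors _ hpre
  obtain ⟨hne, hlen⟩ := hpre
  unfold Spec_minimize_ell minimize_ell minimize_ell_alt
  simp only []
  apply congrArg Prod.fst
  apply PySem.List.foldl_congr_mem
  intro acc x hx
  have hkey : ((PySem.List.sorted (PySem.Set.ofList data) (fun v => v) false).foldl
      (fun (s : PySem.Dict Int Int × Int × Int) v =>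
        let r := s.2.1 + ((data.zip colors).foldl (fun (s : PySem.Dict Int Int × PySem.Dict Int Int) p =>
          if p.2 = "red" then (s.1.modify p.1 0 (· + 1), s.2)
          else if p.2 = "blue" then (s.1, s.2.modify p.1 0 (· + 1))
          else s) (PySem.Dict.empty, PySem.Dict.empty)).1.getD v 0
        let b := s.2.2 + ((data.zip colors).foldl (fun (s : PySem.Dict Int Int × PySem.Dict Int Int) p =>
          if p.2 = "red" then (s.1.modify p.1 0 (· + 1), s.2)
          else if p.2 = "blue" then (s.1, s.2.modify p.1 0 (· + 1))
          else s) (PySem.Dict.empty, PySem.Dict.empty)).2.getD v 0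
        (s.1.insert v (r + (((data.zip colors).foldl (fun acc p => if p.2 = "blue" then acc + 1 else acc) 0) - b)), r, b))
      (PySem.Dict.empty, 0, 0)).1.getD x 0 = compute_ell data colors x := by
    have hp : (PySem.List.sorted (PySem.Set.ofList data) (fun v => v) false).Pairwise (· < ·) :=
      PySem.List.sorted_ofList_pairwise_lt data
    have hxv : x ∈ PySem.List.sorted (PySem.Set.ofList data) (fun v => v) false :=
      (PySem.List.mem_sorted _ _ _ _).mpr ((PySem.Set.mem_ofList data x).mpr hx)
    rw [sweep_getD _ _ _ _ hp _ 0 0 x hxv]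
    have hndS : ((PySem.List.sorted (PySem.Set.ofList data) (fun v => v) false).filter
        (fun v => decide (v ≤ x))).Nodup :=
      List.Nodup.filter _ (hp.imp (fun h => ne_of_lt h))
    have hRmap : ((PySem.List.sorted (PySem.Set.ofList data) (fun v => v) false).filter
          (fun v => decide (v ≤ x))).map (fun v =>
            ((data.zip colors).foldl (fun (s : PySem.Dict Int Int × PySem.Dict Int Int) p =>
              if p.2 = "red" then (s.1.modify p.1 0 (· + 1), s.2)
              else if p.2 = "blue" then (s.1, s.2.modify p.1 0 (· + 1))
              else s) (PySem.Dict.empty, PySem.Dict.empty)).1.getD v 0)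
        = ((PySem.List.sorted (PySem.Set.ofList data) (fun v => v) false).filter
          (fun v => decide (v ≤ x))).map (fun v =>
            (((data.zip colors).countP (fun p => p.1 == v && (p.2 == "red"))) : Int)) := by
      apply List.map_congr_left
      intro a _
      rw [(counters_getD (data.zip colors) PySem.Dict.empty PySem.Dict.empty a).1,
          PySem.Dict.getD_empty]
      simp
    have hBmap : ((PySem.List.sorted (PySem.Set.ofList data) (fun v => v) false).filter
          (fun v => decide (v ≤ x))).map (fun v =>
            ((data.zip colors).foldl (fun (s : PySem.Dict Int Int × PySem.Dict Int Int) p =>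
              if p.2 = "red" then (s.1.modify p.1 0 (· + 1), s.2)
              else if p.2 = "blue" then (s.1, s.2.modify p.1 0 (· + 1))
              else s) (PySem.Dict.empty, PySem.Dict.empty)).2.getD v 0)
        = ((PySem.List.sorted (PySem.Set.ofList data) (fun v => v) false).filter
          (fun v => decide (v ≤ x))).map (fun v =>
            (((data.zip colors).countP (fun p => p.1 == v && (p.2 == "blue"))) : Int)) := by
      apply List.map_congr_left
      intro a _
      rw [(counters_getD (data.zip colors) PySem.Dict.empty PySem.Dict.empty a).2,
          PySem.Dict.getD_empty]
      simp
    rw [hRmap, hBmap,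
        sum_countP_partition _ (fun p => p.2 == "red") _ hndS,
        sum_countP_partition _ (fun p => p.2 == "blue") _ hndS]
    have hmemS : ∀ p ∈ data.zip colors, ∀ (c : String),
        (decide (p.1 ∈ (PySem.List.sorted (PySem.Set.ofList data) (fun v => v) false).filter
          (fun v => decide (v ≤ x))) && (p.2 == c))
        = ((p.2 == c) && decide (p.1 ≤ x)) := by
      intro p hp' c
      have hpd : p.1 ∈ data := (List.of_mem_zip (a := p.1) (b := p.2) (by simpa using hp')).1
      have hpv : p.1 ∈ PySem.List.sorted (PySem.Set.ofList data) (fun v => v) false :=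
        (PySem.List.mem_sorted _ _ _ _).mpr ((PySem.Set.mem_ofList data p.1).mpr hpd)
      by_cases hle : p.1 ≤ x
      · simp [List.mem_filter, hpv, hle, Bool.and_comm]
      · simp [List.mem_filter, hle]
    have hcpr : (data.zip colors).countP (fun p =>
          decide (p.1 ∈ (PySem.List.sorted (PySem.Set.ofList data) (fun v => v) false).filter
            (fun v => decide (v ≤ x))) && (p.2 == "red"))
        = (data.zip colors).countP (fun p => (p.2 == "red") && decide (p.1 ≤ x)) :=
      List.countP_congr (fun p hp' => by rw [hmemS p hp' "red"])
    have hcpb : (data.zip colors).countP (fun p =>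
          decide (p.1 ∈ (PySem.List.sorted (PySem.Set.ofList data) (fun v => v) false).filter
            (fun v => decide (v ≤ x))) && (p.2 == "blue"))
        = (data.zip colors).countP (fun p => (p.2 == "blue") && decide (p.1 ≤ x)) :=
      List.countP_congr (fun p hp' => by rw [hmemS p hp' "blue"])
    rw [hcpr, hcpb,
        PySem.List.foldl_ite_add_one,
        compute_ell_eq_countP data colors hlen x, count_arith]
    have hbt : (data.zip colors).countP (fun p => decide (p.2 = "blue"))
        = (data.zip colors).countP (fun p => p.2 == "blue") :=
      List.countP_congr (fun a _ => by simp)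
    rw [hbt]
    ring
  rw [hkey]
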